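-- pv_equiv track=rewrite | github.com/Neterukun1993/Library | DP/substring_dp.py | calc_next
-- ===== SOURCE A (Python) =====
-- def calc_next(small_characters):
--     n = len(small_characters)
--     nxt = [[-1] * 26 for i in range(n + 1)]
--
--     for i in reversed(range(n)):
--         for val in range(26):
--             if val == ord(small_characters[i]) - 97:
--                 nxt[i][val] = i + 1
--             else:
--                 nxt[i][val] = nxt[i + 1][val]
--     return nxt
-- ===== SOURCE B (Python) =====
-- def calc_next(small_characters):
--     n = len(small_characters)
--     rows = []
--     for i in range(n + 1):
--         row = []
--         for v in range(26):
--             f = small_characters.find(chr(97 + v), i)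
--             row.append(f + 1 if f != -1 else -1)
--         rows.append(row)
--     return rows
-- ===== Notes on version B (the rewrite author's own statement) =====
-- stated objective: simpler
-- what changed: B drops the backward DP recurrence and table entirely and computes every entry directly as str.find(letter, i) + 1 (first occurrence of the letter at or after position i), a brute-force direct search.
import Mathlib
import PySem

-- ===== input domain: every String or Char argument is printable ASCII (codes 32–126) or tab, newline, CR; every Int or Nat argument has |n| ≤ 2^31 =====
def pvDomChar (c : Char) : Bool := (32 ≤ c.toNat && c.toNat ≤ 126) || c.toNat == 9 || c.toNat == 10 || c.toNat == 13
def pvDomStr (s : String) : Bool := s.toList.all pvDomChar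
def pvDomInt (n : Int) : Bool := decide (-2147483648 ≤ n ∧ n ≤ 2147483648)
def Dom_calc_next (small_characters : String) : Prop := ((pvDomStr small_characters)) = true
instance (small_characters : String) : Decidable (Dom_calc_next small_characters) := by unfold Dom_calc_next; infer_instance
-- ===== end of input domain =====

-- B replaces A's backward DP recurrence by a direct brute-force search:
-- each entry is str.find(letter, i) + 1 (first occurrence at or after i), no table (simpler, not faster).

-- ===== PORT A =====
-- A: for i in reversed(range(n)): for val in range(26): nxt[i][val] = i+1 if val == ord(s[i])-97 else nxt[i+1][val].
-- Ported as structural recursion computing the later rows first (exactly the reversed loop order);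
-- the base case is the untouched last row [-1]*26.
def calcNextRowsA : List Char → Int → List (List Int)
  | [], _ => [List.replicate 26 (-1)]
  | c :: rest, i =>
      let tail := calcNextRowsA rest (i + 1)
      let nxtRow := tail.headD []
      ((List.range 26).map (fun (val : Nat) =>
        if (val : Int) = (c.toNat : Int) - 97 then i + 1 else nxtRow.getD val (-1))) :: tail

def calc_next (small_characters : String) : List (List Int) :=
  calcNextRowsA small_characters.toList 0

-- ===== PORT B =====
-- s.find(ch, i): first index ≥ i of ch in s, -1 if none; ported by hand (exact: a left-to-right scan
-- over the whole string that ignores positions before the start index, as CPython does for a 1-char needle).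
def findFromB : List Char → Nat → Nat → Char → Int
  | [], _, _, _ => -1
  | c :: rest, idx, start, ch =>
      if start ≤ idx ∧ c = ch then (idx : Int) else findFromB rest (idx + 1) start ch

-- B: [[(f + 1 if (f := s.find(chr(97+v), i)) != -1 else -1) for v in range(26)] for i in range(n+1)]
def calc_next_alt (small_characters : String) : List (List Int) :=
  (List.range (small_characters.toList.length + 1)).map (fun i =>
    (List.range 26).map (fun v =>
      let f := findFromB small_characters.toList 0 i (Char.ofNat (97 + v))
      if f ≠ -1 then f + 1 else -1))

-- ===== PRECONDITION & SPEC =====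
def Spec_calc_next (small_characters : String) (out : List (List Int)) : Prop := out = calc_next_alt small_characters
instance (small_characters : String) (out : List (List Int)) : Decidable (Spec_calc_next small_characters out) := by unfold Spec_calc_next; infer_instance

-- ===== CLAIM (what is proved, stated in full; the proofs are below) =====
def Claim_equal_calc_next : Prop := ∀ (small_characters : String), Dom_calc_next small_characters → Spec_calc_next small_characters (calc_next small_characters)

-- ===== LEMMAS AND PROOFS =====

-- the common characterisation: next occurrence (1-based, as both programs report it) of letter `val`
-- in `chars`, the suffix starting at absolute index `i`
def nextI : List Char → Int → Int → Int
  | [], _, _ => -1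
  | c :: rest, i, val => if (c.toNat : Int) - 97 = val then i + 1 else nextI rest (i + 1) val

theorem char_ofNat_toNat (v : Nat) (hv : v < 26) : (Char.ofNat (97 + v)).toNat = 97 + v := by
  have h : Nat.isValidChar (97 + v) := Or.inl (by omega)
  simp only [Char.ofNat, h, dif_pos]
  rfl

theorem calcNextRowsA_eq (chars : List Char) (i : Int) :
    calcNextRowsA chars i =
      (List.range (chars.length + 1)).map (fun j =>
        (List.range 26).map (fun (v : Nat) => nextI (chars.drop j) (i + (j : Int)) (v : Int))) := by
  induction chars generalizing i with
  | nil => simp [calcNextRowsA, nextI, List.range_succ]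
  | cons c rest ih =>
      simp only [List.length_cons]
      rw [show List.range (rest.length + 1 + 1) = 0 :: (List.range (rest.length + 1)).map Nat.succ
        from List.range_succ_eq_map]
      simp only [calcNextRowsA, List.map_cons, List.map_map]
      refine List.cons_eq_cons.mpr ⟨?_, ?_⟩
      · rw [ih]
        have hhead : ((List.range (rest.length + 1)).map (fun j =>
            (List.range 26).map (fun (v : Nat) => nextI (rest.drop j) (i + 1 + (j : Int)) (v : Int)))).headD []
            = (List.range 26).map (fun (v : Nat) => nextI rest (i + 1) (v : Int)) := by
          rw [show List.range (rest.length + 1) = 0 :: (List.range rest.length).map Nat.succ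
            from List.range_succ_eq_map, List.map_cons, List.headD_cons]
          simp
        rw [hhead]
        apply List.map_congr_left
        intro v hv
        have hv26 : v < 26 := by simpa using hv
        simp only [List.drop_zero, Nat.cast_zero, add_zero, nextI]
        rcases eq_or_ne ((c.toNat : Int) - 97) (v : Int) with h | h
        · rw [if_pos h.symm, if_pos h]
        · rw [if_neg (fun he => h he.symm), if_neg h]
          rw [List.getD_eq_getElem?_getD, List.getElem?_map]
          simp [List.getElem?_range hv26]
      · rw [ih]
        apply List.map_congr_left
        intro j hj
        simp only [Function.comp, List.drop_succ_cons, Nat.succ_eq_add_one]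
        have h2 : i + 1 + (j : Int) = i + ((j + 1 : Nat) : Int) := by push_cast; ring
        rw [h2]

theorem findFromB_skip (chars : List Char) (idx start : Nat) (ch : Char) (h : idx ≤ start) :
    findFromB chars idx start ch = findFromB (chars.drop (start - idx)) start start ch := by
  induction chars generalizing idx with
  | nil => simp [findFromB]
  | cons c rest ih =>
      rcases eq_or_lt_of_le h with he | hlt
      · subst he; simp
      · have h1 : ¬ (start ≤ idx ∧ c = ch) := by omega
        rw [findFromB, if_neg h1, ih (idx + 1) hlt]
        have h2 : start - idx = (start - (idx + 1)) + 1 := by omega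
        rw [h2, List.drop_succ_cons]

-- once the scan index has passed the start bound, the bound is irrelevant
theorem findFromB_irrel (chars : List Char) (idx start start' : Nat) (ch : Char)
    (h : start ≤ idx) (h' : start' ≤ idx) :
    findFromB chars idx start ch = findFromB chars idx start' ch := by
  induction chars generalizing idx with
  | nil => simp [findFromB]
  | cons c rest ihd =>
      rw [findFromB, findFromB]
      by_cases hd : c = ch
      · rw [if_pos ⟨h, hd⟩, if_pos ⟨h', hd⟩]
      · rw [if_neg (by tauto), if_neg (by tauto)]
        exact ihd (idx + 1) (by omega) (by omega)

theorem findFromB_entry (chars : List Char) (start : Nat) (v : Nat) (hv : v < 26) :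
    (if findFromB chars start start (Char.ofNat (97 + v)) ≠ -1
      then findFromB chars start start (Char.ofNat (97 + v)) + 1 else -1)
    = nextI chars (start : Int) (v : Int) := by
  induction chars generalizing start with
  | nil => simp [findFromB, nextI]
  | cons c rest ih =>
      rw [findFromB, nextI]
      by_cases hc : c = Char.ofNat (97 + v)
      · have hcv : (c.toNat : Int) - 97 = (v : Int) := by
          rw [hc, char_ofNat_toNat v hv]; push_cast; ring
        rw [if_pos (show start ≤ start ∧ c = Char.ofNat (97 + v) from ⟨le_rfl, hc⟩), if_pos hcv]
        have hne : ((start : Int)) ≠ -1 := by omega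
        simp [hne]
      · have hcv : ¬ ((c.toNat : Int) - 97 = (v : Int)) := by
          intro h
          apply hc
          apply Char.ext
          apply UInt32.toNat_inj.mp
          show c.toNat = (Char.ofNat (97 + v)).toNat
          rw [char_ofNat_toNat v hv]; omega
        rw [if_neg (show ¬ (start ≤ start ∧ c = Char.ofNat (97 + v)) by tauto), if_neg hcv]
        rw [findFromB_irrel rest (start + 1) start (start + 1) _ (by omega) (by omega)]
        have := ih (start + 1)
        push_cast at this ⊢
        rw [this]

-- ===== VERDICT (by name: the statement is the Claim_ definition above) =====
theorem calc_next_spec : Claim_equal_calc_next := by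
  intro s _
  unfold Spec_calc_next calc_next calc_next_alt
  rw [calcNextRowsA_eq]
  apply List.map_congr_left
  intro j hj
  apply List.map_congr_left
  intro v hv
  have hv26 : v < 26 := by simpa using hv
  rw [findFromB_skip _ 0 j _ (Nat.zero_le j)]
  simp only [Nat.sub_zero]
  have h := findFromB_entry (s.toList.drop j) j v hv26
  simp only [zero_add] at *
  rw [h]
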